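-- pv_equiv track=rewrite | github.com/kartik-pz/resume_parser | main.py | structure_resume_entities
-- ===== SOURCE A (Python) =====
-- from typing import List, Dict, Any, Optional
--
-- def structure_resume_entities(pipeline_result: List[Dict[str, Any]], tokenizer_for_conversion) -> Dict[str, List[str]]:
--     """
--     Converts a flat list of entities from the HF pipeline into a structured dictionary.
--     Handles non-B-I-O labels by grouping consecutive tokens of the same type.
--     """
--     structured_output: Dict[str, List[str]] = {}
--     if not pipeline_result:
--         return structured_output
--
--     # The pipeline with aggregation_strategy="simple" should already group subwords.
--     # Each item in pipeline_result should be a detected entity.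
--     for entity_item in pipeline_result:
--         label = entity_item.get('entity_group') # 'entity_group' is typical for aggregated results
--         if not label: # Fallback if 'entity_group' is not present
--             label = entity_item.get('entity')
--
--         text = entity_item.get('word', '').strip()
--
--         if not label or label == "O" or not text: # Skip "O" labels or empty text
--             continue
--
--         # Correct potential typo in label from model training
--         if label == "ExperianceYears":
--             label = "ExperienceYears" # Standardizing the key
--
--         if label not in structured_output:
--             structured_output[label] = []
--
--         # Basic deduplication for the same text under the same label
--         if text not in structured_output[label]:
--             structured_output[label].append(text)
--
--     return structured_output
-- ===== SOURCE B (Python) =====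
-- from typing import List, Dict, Any
--
-- def structure_resume_entities(pipeline_result: List[Dict[str, Any]], tokenizer_for_conversion) -> Dict[str, List[str]]:
--     # Pass 1: extraction/cleaning only -> flat list of (label, text) pairs (duplicates kept).
--     def clean(item):
--         label = item.get('entity_group') or item.get('entity')
--         text = item.get('word', '').strip()
--         if not label or label == "O" or not text:
--             return None
--         return ("ExperienceYears" if label == "ExperianceYears" else label, text)
--
--     pairs = [p for p in map(clean, pipeline_result) if p is not None]
--     # Pass 2: distinct labels in first-occurrence order.
--     labels = list(dict.fromkeys(label for label, _ in pairs))
--     # Pass 3: per label, rebuild its ordered-unique texts by a fresh scan of the pair list.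
--     return {label: list(dict.fromkeys(text for l, text in pairs if l == label))
--             for label in labels}
-- ===== Notes on version B (the rewrite author's own statement) =====
-- stated objective: alternative
-- what changed: A builds the result in one incremental pass, mutating a dict and deduplicating inline with a per-append membership test; B builds no dict while scanning: it extracts a flat cleaned (label,text) pair list, takes the distinct labels, and then reconstructs each label's ordered-unique texts by a separate fresh scan of the pair list (per-label nested scans instead of incremental grouping).
import Mathlib
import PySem

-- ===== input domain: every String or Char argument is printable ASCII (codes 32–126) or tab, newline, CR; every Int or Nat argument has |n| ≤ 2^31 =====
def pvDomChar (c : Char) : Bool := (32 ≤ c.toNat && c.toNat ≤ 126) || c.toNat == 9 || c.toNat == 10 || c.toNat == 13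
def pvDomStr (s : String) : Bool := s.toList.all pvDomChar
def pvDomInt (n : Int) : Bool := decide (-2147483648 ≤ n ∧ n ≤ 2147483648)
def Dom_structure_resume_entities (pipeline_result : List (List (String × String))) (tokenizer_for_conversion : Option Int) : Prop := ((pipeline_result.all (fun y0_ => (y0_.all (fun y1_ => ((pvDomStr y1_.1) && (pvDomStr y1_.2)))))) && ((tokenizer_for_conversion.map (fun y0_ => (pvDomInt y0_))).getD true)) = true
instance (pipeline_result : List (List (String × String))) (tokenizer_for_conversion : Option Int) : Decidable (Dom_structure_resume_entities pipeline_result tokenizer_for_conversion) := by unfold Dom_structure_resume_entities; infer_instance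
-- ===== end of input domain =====

-- B replaces A's single incremental dict-building pass (inline per-append dedup) with: extract a
-- flat cleaned (label,text) pair list, take the distinct labels, then rebuild each label's
-- ordered-unique texts by a separate scan of the pair list; equal return value, tokenizer unused.

-- ===== PORT A =====
-- one iteration of A's loop over `pipeline_result`
def pvStepA (d : PySem.Dict String (List String)) (item : List (String × String)) : PySem.Dict String (List String) :=
  let label0 := (PySem.Dict.mk item).get? "entity_group"
  let label : Option String :=
    match label0 with
    | none => (PySem.Dict.mk item).get? "entity"            -- fallback when missing
    | some s => if s = "" then (PySem.Dict.mk item).get? "entity" else some s  -- fallback when falsy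
  let text := PySem.Str.strip (((PySem.Dict.mk item).get? "word").getD "")
  match label with
  | none => d
  | some lab0 =>
    if lab0 = "" ∨ lab0 = "O" ∨ text = "" then d            -- `continue`
    else
      let lab := if lab0 = "ExperianceYears" then "ExperienceYears" else lab0
      let d1 := if d.contains lab then d else d.insert lab []
      if text ∈ d1.getD lab [] then d1 else d1.modify lab [] (fun xs => xs ++ [text])

def structure_resume_entities (pipeline_result : List (List (String × String))) (tokenizer_for_conversion : Option Int) : List (String × List String) :=
  if pipeline_result = [] then []
  else (pipeline_result.foldl pvStepA PySem.Dict.empty).items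

-- ===== PORT B =====
-- B's `clean`: cleaned (label, text) pair of one entity, or None if it is skipped
def pvExtractB (item : List (String × String)) : Option (String × String) :=
  let label : Option String :=
    match (PySem.Dict.mk item).get? "entity_group" with
    | some s => if s = "" then (PySem.Dict.mk item).get? "entity" else some s  -- `or` fallback
    | none => (PySem.Dict.mk item).get? "entity"
  let text := PySem.Str.strip (((PySem.Dict.mk item).get? "word").getD "")
  match label with
  | none => none
  | some lab =>
    if lab ≠ "" ∧ lab ≠ "O" ∧ text ≠ "" then
      some ((if lab = "ExperianceYears" then "ExperienceYears" else lab), text)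
    else none

def structure_resume_entities_alt (pipeline_result : List (List (String × String))) (tokenizer_for_conversion : Option Int) : List (String × List String) :=
  -- pass 1: flat cleaned pair list ([p for p in map(clean, …) if p is not None])
  let pairs := pipeline_result.filterMap pvExtractB
  -- pass 2: distinct labels in first-occurrence order (list(dict.fromkeys(…)))
  let labels := PySem.List.dedup (pairs.map Prod.fst)
  -- pass 3: per label, a fresh scan of `pairs` collecting its ordered-unique texts
  labels.map (fun lab => (lab, PySem.List.dedup ((pairs.filter (fun p => p.1 == lab)).map (·.2))))

-- ===== PRECONDITION & SPEC =====
def Spec_structure_resume_entities (pipeline_result : List (List (String × String))) (tokenizer_for_conversion : Option Int) (out : List (String × List String)) : Prop := out = structure_resume_entities_alt pipeline_result tokenizer_for_conversion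
instance (pipeline_result : List (List (String × String))) (tokenizer_for_conversion : Option Int) (out : List (String × List String)) : Decidable (Spec_structure_resume_entities pipeline_result tokenizer_for_conversion out) := by unfold Spec_structure_resume_entities; infer_instance

-- ===== CLAIM (what is proved, stated in full; the proofs are below) =====
def Claim_equal_structure_resume_entities : Prop := ∀ (pipeline_result : List (List (String × String))) (tokenizer_for_conversion : Option Int), Dom_structure_resume_entities pipeline_result tokenizer_for_conversion → Spec_structure_resume_entities pipeline_result tokenizer_for_conversion (structure_resume_entities pipeline_result tokenizer_for_conversion)

-- ===== LEMMAS AND PROOFS =====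

-- value mapping: dedup each group's text list
def pvDedupEntry (p : String × List String) : String × List String := (p.1, PySem.Set.ofList p.2)

-- A's loop body on an already-extracted pair (literally A's tail after the guards)
def pvAdd1 (d : PySem.Dict String (List String)) (p : String × String) : PySem.Dict String (List String) :=
  let d1 := if d.contains p.1 then d else d.insert p.1 []
  if p.2 ∈ d1.getD p.1 [] then d1 else d1.modify p.1 [] (fun xs => xs ++ [p.2])

lemma pvStepA_eq (d : PySem.Dict String (List String)) (item : List (String × String)) :
    pvStepA d item = (match pvExtractB item with | some p => pvAdd1 d p | none => d) := by
  unfold pvStepA pvExtractB pvAdd1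
  cases hg : (PySem.Dict.mk item).get? "entity_group" with
  | none =>
    cases he : (PySem.Dict.mk item).get? "entity" with
    | none => simp
    | some s => simp; split_ifs <;> simp_all
  | some s =>
    by_cases hs : s = ""
    · cases he : (PySem.Dict.mk item).get? "entity" with
      | none => simp [hs]
      | some s' => simp [hs]; split_ifs <;> simp_all
    · simp [hs]; split_ifs <;> simp_all

lemma pvFoldA_eq (pr : List (List (String × String))) (d : PySem.Dict String (List String)) :
    pr.foldl pvStepA d = (pr.filterMap pvExtractB).foldl pvAdd1 d := by
  induction pr generalizing d with
  | nil => rfl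
  | cons x xs ih =>
    cases h : pvExtractB x <;> simp [List.foldl_cons, pvStepA_eq, h, ih]

lemma pvContains_map (l : List (String × List String)) (k : String) :
    (PySem.Dict.mk (l.map pvDedupEntry)).contains k = (PySem.Dict.mk l).contains k := by
  simp [PySem.Dict.contains, List.any_map, pvDedupEntry, Function.comp_def]

lemma pvGet?_map (l : List (String × List String)) (k : String) :
    (PySem.Dict.mk (l.map pvDedupEntry)).get? k = ((PySem.Dict.mk l).get? k).map PySem.Set.ofList := by
  induction l with
  | nil => simp [PySem.Dict.get?]
  | cons p l ih =>
    obtain ⟨a, b⟩ := p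
    by_cases h : a = k <;> simp [pvDedupEntry, PySem.Dict.get?_mk_cons, h, ih]

-- a key-replacing map is the identity on a list without that key
lemma pvReplace_id {nu : Type} (xs : List (String × nu)) (lab : String) (v : nu)
    (h : ∀ p ∈ xs, p.1 ≠ lab) :
    xs.map (fun p => if p.1 == lab then (lab, v) else p) = xs := by
  have hcong : ∀ p ∈ xs, (if p.1 == lab then (lab, v) else p) = id p := by
    intro p hp
    simp [h p hp]
  rw [List.map_congr_left hcong, List.map_id]

-- the commuting step: A's add on the dedupped dict = dedup of the grouping add
lemma pvComm (l : List (String × List String)) (hn : (l.map Prod.fst).Nodup)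
    (lab t : String) :
    pvAdd1 (PySem.Dict.mk (l.map pvDedupEntry)) (lab, t)
      = PySem.Dict.mk ((((PySem.Dict.mk l).modify lab [] (fun xs => xs ++ [t])).items).map pvDedupEntry) := by
  unfold pvAdd1 PySem.Dict.modify
  rw [pvContains_map]
  by_cases hc : (PySem.Dict.mk l).contains lab = true
  · -- key already present: d1 = G, values relate by Set.ofList
    obtain ⟨v, hv⟩ : ∃ v, (PySem.Dict.mk l).get? lab = some v := by
      rw [PySem.Dict.contains_eq_isSome_get?] at hc
      exact Option.isSome_iff_exists.mp hc
    have hgD : (PySem.Dict.mk l).getD lab [] = v := by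
      rw [PySem.Dict.getD_eq_get?_getD, hv]; rfl
    have hgG : (PySem.Dict.mk (l.map pvDedupEntry)).getD lab [] = PySem.Set.ofList v := by
      rw [PySem.Dict.getD_eq_get?_getD, pvGet?_map, hv]; rfl
    simp only [hc, if_true, hgD, hgG]
    have hvals : ∀ p ∈ l, p.1 = lab → p.2 = v := by
      intro p hp hpk
      have := PySem.Dict.get?_of_mem_items (PySem.Dict.mk l)
        (k := p.1) (v := p.2) hp hn
      rw [hpk, hv] at this
      exact (Option.some_inj.mp this).symm
    by_cases hm : t ∈ v
    · -- duplicate text: A leaves the dict unchanged, B's dedup removes the appended copy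
      have hms : t ∈ PySem.Set.ofList v := (PySem.Set.mem_ofList v t).mpr hm
      simp only [hms, if_true]
      apply PySem.Dict.ext
      rw [PySem.Dict.items_insert_of_contains _ _ hc]
      show l.map pvDedupEntry = _
      rw [List.map_map, List.map_congr_left]
      intro p hp
      by_cases hpk : p.1 = lab
      · simp only [Function.comp_apply, beq_iff_eq, hpk, if_true, pvDedupEntry,
          PySem.Set.ofList_append_singleton, PySem.Set.add_of_mem hms, hvals p hp hpk]
      · simp [Function.comp_apply, hpk, pvDedupEntry]
    · -- new text under an existing label: both append it
      have hms : t ∉ PySem.Set.ofList v := fun h => hm ((PySem.Set.mem_ofList v t).mp h)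
      simp only [hms, if_false]
      apply PySem.Dict.ext
      rw [PySem.Dict.items_insert_of_contains _ _ (by rw [pvContains_map]; exact hc),
        PySem.Dict.items_insert_of_contains _ _ hc]
      show (l.map pvDedupEntry).map _ = (l.map _).map pvDedupEntry
      rw [List.map_map, List.map_map, List.map_congr_left]
      intro p hp
      by_cases hpk : p.1 = lab
      · simp only [Function.comp_apply, pvDedupEntry, beq_iff_eq, hpk, if_true,
          PySem.Set.ofList_append_singleton, PySem.Set.add_of_not_mem hms, hvals p hp hpk]
      · simp [Function.comp_apply, hpk, pvDedupEntry]
  · -- fresh label: both create the entry with the single text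
    have hc' : (PySem.Dict.mk l).contains lab = false := by
      cases h : (PySem.Dict.mk l).contains lab
      · rfl
      · exact absurd h hc
    have hnot : ∀ p ∈ l.map pvDedupEntry, p.1 ≠ lab := by
      intro p hp hpk
      obtain ⟨q, hq, rfl⟩ := List.mem_map.mp hp
      apply hc
      simp only [PySem.Dict.contains]
      exact List.any_eq_true.mpr ⟨q, hq, by simpa [pvDedupEntry] using hpk⟩
    simp only [hc', Bool.false_eq_true, if_false]
    rw [PySem.Dict.getD_insert_self]
    simp only [List.not_mem_nil, if_false]
    apply PySem.Dict.ext
    rw [PySem.Dict.items_insert_of_contains _ _ (by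
          rw [PySem.Dict.contains_eq_isSome_get?, PySem.Dict.get?_insert_self]; rfl),
      PySem.Dict.items_insert_of_not_contains _ _ (by rw [pvContains_map]; exact hc'),
      PySem.Dict.items_insert_of_not_contains _ _ hc',
      PySem.Dict.getD_of_not_contains _ _ hc']
    show (l.map pvDedupEntry ++ [(lab, [])]).map _ = (l ++ [(lab, [] ++ [t])]).map pvDedupEntry
    rw [List.map_append, List.map_append, pvReplace_id _ _ _ hnot]
    simp [pvDedupEntry, PySem.Set.ofList]

-- A's fold over the pair stream = dedup of the plain grouping fold
lemma pvMain (ps : List (String × String)) (l : List (String × List String))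
    (hn : (l.map Prod.fst).Nodup) :
    ps.foldl pvAdd1 (PySem.Dict.mk (l.map pvDedupEntry))
      = PySem.Dict.mk (((ps.foldl (fun g p => g.modify p.1 [] (fun xs => xs ++ [p.2])) (PySem.Dict.mk l)).items).map pvDedupEntry) := by
  induction ps generalizing l with
  | nil => rfl
  | cons p ps ih =>
    obtain ⟨lab, t⟩ := p
    rw [List.foldl_cons, List.foldl_cons, pvComm l hn lab t]
    have hn' : ((((PySem.Dict.mk l).modify lab [] (fun xs => xs ++ [t])).items).map Prod.fst).Nodup :=
      PySem.Dict.nodup_keys_insert (PySem.Dict.mk l) lab _ hn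
    rw [ih _ hn']

-- the grouping fold's items, characterized per distinct label
lemma pvGroupItems (ps : List (String × String)) :
    (ps.foldl (fun g p => g.modify p.1 [] (fun xs => xs ++ [p.2])) PySem.Dict.empty).items
      = (PySem.Set.ofList (ps.map Prod.fst)).map
          (fun k => (k, (ps.filter (fun p => p.1 == k)).map (·.2))) := by
  set G := ps.foldl (fun g p => g.modify p.1 [] (fun xs => xs ++ [p.2])) PySem.Dict.empty with hG
  have hkeys : G.keys = PySem.Set.ofList (ps.map Prod.fst) := by
    rw [hG, PySem.Dict.keys_foldl_modify_key]
    simp [PySem.Dict.keys_empty, PySem.Set.ofList_eq_foldl, PySem.Set.update]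
  have hnd : G.keys.Nodup := by
    rw [hkeys]; exact PySem.Set.nodup_ofList _
  rw [PySem.Dict.items_eq_map_keys G hnd [], hkeys, List.map_congr_left]
  intro k _
  rw [hG, PySem.Dict.getD_foldl_modify_append, PySem.Dict.getD_empty]
  rfl

-- ===== VERDICT (by name: the statement is the Claim_ definition above) =====
theorem structure_resume_entities_spec : Claim_equal_structure_resume_entities := by
  intro pr tk _
  unfold Spec_structure_resume_entities structure_resume_entities structure_resume_entities_alt
  by_cases h : pr = []
  · subst h; rfl
  · simp only [h, if_false]
    rw [pvFoldA_eq]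
    have := pvMain (pr.filterMap pvExtractB) [] (by simp)
    simp only [List.map_nil] at this
    rw [show (PySem.Dict.mk ([] : List (String × List String))) = PySem.Dict.empty from rfl] at this
    rw [this]
    show ((pr.filterMap pvExtractB).foldl _ PySem.Dict.empty).items.map pvDedupEntry = _
    rw [pvGroupItems, List.map_map]
    simp [pvDedupEntry, Function.comp_def]
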